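-- pv_equiv track=rewrite | github.com/dhanasekars/Daily-Python-Practise | 2023-01/Jan_04_Debug.py | score_words
-- ===== SOURCE A (Python) =====
-- def is_vowel(letter):
--     return letter in ['a', 'e', 'i', 'o', 'u', 'y']
--
-- def score_words(words):
--     score = 0
--     for word in words:
--         num_vowels = 0
--         for letter in word:
--             if is_vowel(letter):
--                 num_vowels += 1
--         if num_vowels is not 0:
--             if num_vowels % 2 == 0:
--                 score += 2
--             else:
--                 score += 1
--         else:
--             score = 0
--     return score
-- ===== SOURCE B (Python) =====
-- def score_words(words):
--     # Reverse traversal: a zero-vowel word resets the score in A, so only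
--     # words after the last zero-vowel word contribute.
--     score = 0
--     for word in reversed(words):
--         nv = sum(1 for ch in word if ch in 'aeiouy')
--         if nv == 0:
--             break
--         score += 2 if nv % 2 == 0 else 1
--     return score
-- ===== Notes on version B (the rewrite author's own statement) =====
-- stated objective: alternative
-- what changed: Replaces the forward loop with stateful reset-to-zero by a reverse traversal that stops at the first zero-vowel word, summing parity contributions of only the words after the last reset.
import Mathlib
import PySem

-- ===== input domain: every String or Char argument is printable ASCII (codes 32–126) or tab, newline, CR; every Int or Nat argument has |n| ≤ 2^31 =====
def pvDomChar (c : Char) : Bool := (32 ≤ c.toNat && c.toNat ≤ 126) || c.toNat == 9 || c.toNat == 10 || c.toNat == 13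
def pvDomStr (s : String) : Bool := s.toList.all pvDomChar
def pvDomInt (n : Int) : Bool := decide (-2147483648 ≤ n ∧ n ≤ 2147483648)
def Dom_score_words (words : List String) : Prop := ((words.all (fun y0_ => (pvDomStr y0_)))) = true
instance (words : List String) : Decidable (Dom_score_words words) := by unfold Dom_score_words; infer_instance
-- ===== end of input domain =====

-- B replaces A's forward loop with reset-to-zero by a reverse traversal stopping
-- at the first zero-vowel word (alternative decomposition, same cost).

-- ===== PORT A =====
def pvIsVowel (letter : Char) : Bool := ['a', 'e', 'i', 'o', 'u', 'y'].contains letter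

def score_words (words : List String) : Int :=
  words.foldl (fun score word =>
    let num_vowels : Int :=
      word.toList.foldl (fun nv letter => if pvIsVowel letter then nv + 1 else nv) 0
    if num_vowels ≠ 0 then
      (if num_vowels % 2 = 0 then score + 2 else score + 1)
    else 0) 0

-- ===== PORT B =====
-- nv = sum(1 for ch in word if ch in 'aeiouy')
def pvNv (word : String) : Int :=
  ((word.toList.filter (fun ch => "aeiouy".toList.contains ch)).length : Int)

-- the reversed-for loop with break, as structural recursion over the reversed list
def pvGo (score : Int) : List String → Int
  | [] => score
  | word :: rest =>
    let nv := pvNv word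
    if nv = 0 then score
    else pvGo (score + (if nv % 2 = 0 then 2 else 1)) rest

def score_words_alt (words : List String) : Int := pvGo 0 words.reverse

-- ===== PRECONDITION & SPEC =====
def Spec_score_words (words : List String) (out : Int) : Prop := out = score_words_alt words
instance (words : List String) (out : Int) : Decidable (Spec_score_words words out) := by unfold Spec_score_words; infer_instance

-- ===== CLAIM (what is proved, stated in full; the proofs are below) =====
def Claim_equal_score_words : Prop := ∀ (words : List String), Dom_score_words words → Spec_score_words words (score_words words)

-- ===== LEMMAS AND PROOFS =====

theorem pvPred_eq : (fun ch => "aeiouy".toList.contains ch) = (fun ch => pvIsVowel ch) := rfl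

theorem pvCount_eq (l : List Char) (acc : Int) :
    l.foldl (fun nv letter => if pvIsVowel letter then nv + 1 else nv) acc
      = acc + ((l.filter (fun ch => pvIsVowel ch)).length : Int) := by
  induction l generalizing acc with
  | nil => simp
  | cons c t ih =>
    rw [List.foldl_cons, List.filter_cons]
    by_cases hc : pvIsVowel c = true
    · rw [if_pos hc, if_pos hc, ih, List.length_cons]
      push_cast; ring
    · rw [if_neg hc, if_neg hc, ih]

theorem pvGo_add (l : List String) (acc : Int) : pvGo acc l = acc + pvGo 0 l := by
  induction l generalizing acc with
  | nil => simp [pvGo]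
  | cons w t ih =>
    by_cases h : pvNv w = 0
    · simp [pvGo, h]
    · simp only [pvGo, if_neg h]
      rw [ih ((0 : Int) + (if pvNv w % 2 = 0 then 2 else 1)), ih]
      ring

theorem score_words_eq_alt (words : List String) : score_words words = score_words_alt words := by
  induction words using List.reverseRecOn with
  | nil => simp [score_words, score_words_alt, pvGo]
  | append_singleton ws w ih =>
    simp only [score_words, score_words_alt, List.foldl_append, List.foldl_cons, List.foldl_nil,
      List.reverse_append, List.reverse_cons, List.reverse_nil, List.nil_append,
      List.singleton_append, pvGo, pvNv, pvPred_eq, pvCount_eq, zero_add, ne_eq] at ih ⊢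
    by_cases h : ((w.toList.filter (fun ch => pvIsVowel ch)).length : Int) = 0
    · rw [if_neg (not_not_intro h), if_pos h]
    · rw [if_pos h, if_neg h, pvGo_add, ih]
      split_ifs <;> omega

-- ===== VERDICT (by name: the statement is the Claim_ definition above) =====
theorem score_words_spec : Claim_equal_score_words := by
  intro words _
  exact score_words_eq_alt words
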